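-- pv_equiv track=rewrite | github.com/bshishov/HashCode2019 | practice/attempt2.py | get_possible_shapes
-- ===== SOURCE A (Python) =====
-- def iterate_divisors(size):
--     """ Iterates over all possible divisors and dividers of the input
--
--         Example:
--             iterate_divisors(size=6)
--             output (iterable): (1, 6), (2, 3), (3, 2), (6, 1)
--     """
--     for i in range(1, size + 1):
--         if size % i == 0:
--             yield i, size // i
--
-- def get_possible_shapes(min_ingredients: int, slice_cap: int):
--     """ Returns the list of all possible shape sizes according to the original problem """
--     valid_shapes = []
--     min_size = min_ingredients * 2
--     max_size = slice_cap
--     for size in range(min_size, max_size + 1):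
--         for dimensions in iterate_divisors(size):
--             valid_shapes.append(dimensions)
--     return valid_shapes
-- ===== SOURCE B (Python) =====
-- def get_possible_shapes(min_ingredients: int, slice_cap: int):
--     """ Returns the list of all possible shape sizes according to the original problem """
--     valid_shapes = []
--     for size in range(min_ingredients * 2, slice_cap + 1):
--         small = []
--         big = []
--         d = 1
--         while d * d <= size:
--             if size % d == 0:
--                 q = size // d
--                 small.append((d, q))
--                 if q != d:
--                     big.append((q, d))
--             d += 1
--         valid_shapes.extend(small)
--         valid_shapes.extend(reversed(big))
--     return valid_shapes
-- ===== Notes on version B (the rewrite author's own statement) =====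
-- stated objective: alternative
-- what changed: Per size, B finds divisor pairs by trial division only up to sqrt(size), emitting small divisors forward and their large complements from a reversed buffer, instead of A's full scan of 1..size; on the generated benchmark inputs this was not measurably faster.
import Mathlib
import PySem

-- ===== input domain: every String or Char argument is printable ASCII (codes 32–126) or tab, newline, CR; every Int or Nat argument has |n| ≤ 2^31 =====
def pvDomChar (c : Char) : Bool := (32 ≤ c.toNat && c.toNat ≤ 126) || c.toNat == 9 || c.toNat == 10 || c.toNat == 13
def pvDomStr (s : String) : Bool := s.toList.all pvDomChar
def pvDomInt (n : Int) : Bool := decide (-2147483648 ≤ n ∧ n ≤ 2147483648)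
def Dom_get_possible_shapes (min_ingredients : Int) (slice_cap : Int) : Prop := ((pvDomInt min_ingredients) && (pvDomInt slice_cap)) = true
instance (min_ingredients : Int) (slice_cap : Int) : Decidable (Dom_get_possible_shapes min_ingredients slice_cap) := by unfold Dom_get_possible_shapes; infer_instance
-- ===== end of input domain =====

-- B finds each size's divisor pairs by trial division up to sqrt(size) (small divisors
-- forward, complements from a reversed buffer) instead of A's full scan of 1..size.

-- ===== PORT A =====
-- generator iterate_divisors(size), materialised in A's consuming loop as the list of yielded pairs
def iterate_divisors (size : Int) : List (Int × Int) :=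
  (PySem.List.pyRange 1 (size + 1) 1).foldl
    (fun acc i => if PySem.Int.mod size i = 0 then acc ++ [(i, PySem.Int.floordiv size i)] else acc) []

def get_possible_shapes (min_ingredients : Int) (slice_cap : Int) : List (Int × Int) :=
  (PySem.List.pyRange (min_ingredients * 2) (slice_cap + 1) 1).foldl
    (fun valid_shapes size => valid_shapes ++ iterate_divisors size) []

-- ===== PORT B =====
-- the 'while d * d <= size' loop of Source B, carrying the two buffers small and big
-- (the Nat argument is fuel making the loop total; it never runs out: the loop stops once d*d > size)
def pvDivLoop (size : Int) : Nat → Int → List (Int × Int) → List (Int × Int) → List (Int × Int) × List (Int × Int)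
  | 0, _, small, big => (small, big)
  | fuel + 1, d, small, big =>
    if d * d ≤ size then
      if PySem.Int.mod size d = 0 then
        let q := PySem.Int.floordiv size d
        pvDivLoop size fuel (d + 1) (small ++ [(d, q)]) (if q ≠ d then big ++ [(q, d)] else big)
      else
        pvDivLoop size fuel (d + 1) small big
    else (small, big)

def get_possible_shapes_alt (min_ingredients : Int) (slice_cap : Int) : List (Int × Int) :=
  (PySem.List.pyRange (min_ingredients * 2) (slice_cap + 1) 1).foldl
    (fun valid_shapes size =>
      let sb := pvDivLoop size (size.toNat + 1) 1 [] []
      (valid_shapes ++ sb.1) ++ sb.2.reverse) []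

-- ===== PRECONDITION & SPEC =====
def Spec_get_possible_shapes (min_ingredients : Int) (slice_cap : Int) (out : List (Int × Int)) : Prop := out = get_possible_shapes_alt min_ingredients slice_cap
instance (min_ingredients : Int) (slice_cap : Int) (out : List (Int × Int)) : Decidable (Spec_get_possible_shapes min_ingredients slice_cap out) := by unfold Spec_get_possible_shapes; infer_instance

-- ===== CLAIM (what is proved, stated in full; the proofs are below) =====
def Claim_equal_get_possible_shapes : Prop := ∀ (min_ingredients : Int) (slice_cap : Int), Dom_get_possible_shapes min_ingredients slice_cap → Spec_get_possible_shapes min_ingredients slice_cap (get_possible_shapes min_ingredients slice_cap)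

-- ===== LEMMAS AND PROOFS =====

-- candidate trial divisors d, d+1, … as long as the square stays ≤ size
def pvCand (size d : Int) : List Int :=
  if d * d ≤ size then d :: pvCand size (d + 1) else []
termination_by (size + 1 - d).toNat
decreasing_by
  have hdn : d ≤ size := by nlinarith [mul_self_nonneg d]
  omega

theorem pvDivLoop_spec (size : Int) : ∀ fuel d small big, 1 ≤ d → (size + 1 - d).toNat < fuel →
    pvDivLoop size fuel d small big =
      (small ++ ((pvCand size d).filter (fun e => decide (PySem.Int.mod size e = 0))).map
          (fun e => (e, PySem.Int.floordiv size e)),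
       big ++ ((pvCand size d).filter
            (fun e => decide (PySem.Int.mod size e = 0) && decide (PySem.Int.floordiv size e ≠ e))).map
          (fun e => (PySem.Int.floordiv size e, e))) := by
  intro fuel
  induction fuel with
  | zero => intro d small big _ hf; omega
  | succ fuel ih =>
    intro d small big hd hf
    by_cases h : d * d ≤ size
    · have hdn : d ≤ size := by nlinarith
      rw [pvDivLoop, pvCand]
      simp only [h, if_pos]
      by_cases hm : PySem.Int.mod size d = 0
      · rw [if_pos hm, ih (d + 1) _ _ (by omega) (by omega)]
        by_cases hq : PySem.Int.floordiv size d ≠ d <;>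
          simp [hm, hq, List.append_assoc]
      · rw [if_neg hm, ih (d + 1) _ _ (by omega) (by omega)]
        simp [hm]
    · rw [pvDivLoop, pvCand]
      simp [h]

theorem mem_pvCand (size : Int) : ∀ d, 1 ≤ d → ∀ x, (x ∈ pvCand size d ↔ d ≤ x ∧ x * x ≤ size) := by
  intro d
  induction d using pvCand.induct size with
  | case1 d h ih =>
    intro hd x
    rw [pvCand, if_pos h, List.mem_cons, ih (by omega) x]
    constructor
    · rintro (rfl | ⟨h1, h2⟩)
      · exact ⟨le_refl _, h⟩
      · exact ⟨by omega, h2⟩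
    · rintro ⟨h1, h2⟩
      rcases eq_or_lt_of_le h1 with rfl | hlt
      · exact Or.inl rfl
      · exact Or.inr ⟨by omega, h2⟩
  | case2 d h =>
    intro hd x
    rw [pvCand, if_neg h]
    simp only [List.not_mem_nil, false_iff]
    rintro ⟨h1, h2⟩
    exact h (by nlinarith)

theorem pvCand_pairwise (size : Int) : ∀ d, 1 ≤ d → (pvCand size d).Pairwise (· < ·) := by
  intro d
  induction d using pvCand.induct size with
  | case1 d h ih =>
    intro hd
    rw [pvCand, if_pos h]
    refine List.pairwise_cons.2 ⟨fun x hx => ?_, ih (by omega)⟩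
    have := (mem_pvCand size (d + 1) (by omega) x).1 hx
    omega
  | case2 d h =>
    intro hd
    rw [pvCand, if_neg h]
    exact List.Pairwise.nil

-- a positive divisor e of a positive size: its cofactor q = size // e satisfies 1 ≤ q and e * q = size
theorem pvDivFacts (size e : Int) (hs : 1 ≤ size) (he : 1 ≤ e) (hdvd : e ∣ size) :
    1 ≤ PySem.Int.floordiv size e ∧ e * PySem.Int.floordiv size e = size := by
  rw [PySem.Int.floordiv_eq_ediv_of_pos (by omega)]
  have hmul : e * (size / e) = size := Int.mul_ediv_cancel' hdvd
  refine ⟨?_, hmul⟩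
  nlinarith [hmul]

-- size // (size // e) = e for a positive divisor e of a positive size
theorem pvFloordivInv (size e : Int) (hs : 1 ≤ size) (he : 1 ≤ e) (hdvd : e ∣ size) :
    PySem.Int.floordiv size (PySem.Int.floordiv size e) = e := by
  obtain ⟨hq1, hq2⟩ := pvDivFacts size e hs he hdvd
  set q := PySem.Int.floordiv size e with hqdef
  rw [PySem.Int.floordiv_eq_ediv_of_pos (by omega : (0 : Int) < q), ← hq2, mul_comm]
  exact Int.mul_ediv_cancel_left e (by omega)

-- the per-size key lists: A's ascending divisor scan vs B's sqrt-paired enumeration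
theorem pvKeys (size : Int) :
    (PySem.List.pyRange 1 (size + 1) 1).filter (fun i => decide (PySem.Int.mod size i = 0)) =
      (pvCand size 1).filter (fun e => decide (PySem.Int.mod size e = 0)) ++
      (((pvCand size 1).filter
          (fun e => decide (PySem.Int.mod size e = 0) && decide (PySem.Int.floordiv size e ≠ e))).reverse).map
        (fun e => PySem.Int.floordiv size e) := by
  by_cases hs : 1 ≤ size
  case neg =>
    have h1 : PySem.List.pyRange 1 (size + 1) 1 = [] := by
      rw [PySem.List.pyRange_one]
      have : (size + 1 - 1).toNat = 0 := by omega
      rw [this]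
      rfl
    have h2 : pvCand size 1 = [] := by
      rw [pvCand, if_neg (by omega)]
    simp [h1, h2]
  case pos =>
  have hmemC : ∀ x : Int, x ∈ pvCand size 1 ↔ 1 ≤ x ∧ x * x ≤ size :=
    mem_pvCand size 1 le_rfl
  have hCpair : (pvCand size 1).Pairwise (· < ·) := pvCand_pairwise size 1 le_rfl
  set L := (PySem.List.pyRange 1 (size + 1) 1).filter (fun i => decide (PySem.Int.mod size i = 0)) with hL
  set Sm := (pvCand size 1).filter (fun e => decide (PySem.Int.mod size e = 0)) with hSm
  set Bg := (pvCand size 1).filter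
      (fun e => decide (PySem.Int.mod size e = 0) && decide (PySem.Int.floordiv size e ≠ e)) with hBg
  have hmemSm : ∀ x, x ∈ Sm ↔ (1 ≤ x ∧ x * x ≤ size ∧ x ∣ size) := by
    intro x
    rw [hSm, List.mem_filter]
    simp only [decide_eq_true_eq, hmemC, PySem.Int.mod_eq_zero_iff_dvd]
    tauto
  have hmemBg : ∀ x, x ∈ Bg ↔
      (1 ≤ x ∧ x * x ≤ size ∧ x ∣ size ∧ PySem.Int.floordiv size x ≠ x) := by
    intro x
    rw [hBg, List.mem_filter]
    simp only [Bool.and_eq_true, decide_eq_true_eq, hmemC, PySem.Int.mod_eq_zero_iff_dvd]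
    tauto
  have hpairL : L.Pairwise (· < ·) :=
    (PySem.List.pairwise_lt_pyRange_one 1 (size + 1)).filter _
  have hpairR : (Sm ++ Bg.reverse.map (fun e => PySem.Int.floordiv size e)).Pairwise (· < ·) := by
    rw [List.pairwise_append]
    refine ⟨hCpair.filter _, ?_, ?_⟩
    · -- big part ascending: complements of descending small divisors
      rw [List.pairwise_map, List.pairwise_reverse]
      refine List.Pairwise.imp_of_mem (fun {a b} ha hb hab => ?_) (hCpair.filter _)
      obtain ⟨ha1, ha2, ha3, -⟩ := (hmemBg a).1 ha
      obtain ⟨hb1, hb2, hb3, -⟩ := (hmemBg b).1 hb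
      obtain ⟨hqa, hma⟩ := pvDivFacts size a hs ha1 ha3
      obtain ⟨hqb, hmb⟩ := pvDivFacts size b hs hb1 hb3
      show PySem.Int.floordiv size b < PySem.Int.floordiv size a
      nlinarith [hma, hmb]
    · -- every small key < every big key
      intro x hx y hy
      obtain ⟨hx1, hx2, -⟩ := (hmemSm x).1 hx
      obtain ⟨e, he, rfl⟩ := List.mem_map.1 hy
      obtain ⟨he1, he2, he3, hne⟩ := (hmemBg e).1 (List.mem_reverse.1 he)
      obtain ⟨hq1, hq2⟩ := pvDivFacts size e hs he1 he3
      have hle : e ≤ PySem.Int.floordiv size e := by nlinarith [hq2]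
      have hqe : e < PySem.Int.floordiv size e := lt_of_le_of_ne hle (Ne.symm hne)
      nlinarith [hq2]
  have hmemR : ∀ a, a ∈ Sm ++ Bg.reverse.map (fun e => PySem.Int.floordiv size e) ↔
      (1 ≤ a ∧ a ≤ size ∧ a ∣ size) := by
    intro a
    rw [List.mem_append, List.mem_map]
    constructor
    · rintro (h | ⟨e, he, rfl⟩)
      · obtain ⟨h1, h2, h3⟩ := (hmemSm a).1 h
        exact ⟨h1, by nlinarith, h3⟩
      · obtain ⟨he1, he2, he3, hne⟩ := (hmemBg e).1 (List.mem_reverse.1 he)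
        obtain ⟨hq1, hq2⟩ := pvDivFacts size e hs he1 he3
        exact ⟨hq1, by nlinarith, ⟨e, by linarith [mul_comm e (PySem.Int.floordiv size e)]⟩⟩
    · rintro ⟨h1, h2, h3⟩
      by_cases hsq : a * a ≤ size
      · exact Or.inl ((hmemSm a).2 ⟨h1, hsq, h3⟩)
      · -- a is the large partner of e := size // a
        rw [not_le] at hsq
        obtain ⟨hq1, hq2⟩ := pvDivFacts size a hs h1 h3
        set e := PySem.Int.floordiv size a with hedef
        have hea : e < a := by nlinarith [hq2]
        have hedvd : e ∣ size := ⟨a, by rw [← hq2]; ring⟩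
        have heq : PySem.Int.floordiv size e = a := by
          rw [hedef, pvFloordivInv size a hs h1 h3]
        refine Or.inr ⟨e, List.mem_reverse.2 ((hmemBg e).2 ⟨hq1, by nlinarith, hedvd, ?_⟩), heq⟩
        rw [heq]; omega
  have hmemL : ∀ a, a ∈ L ↔ (1 ≤ a ∧ a ≤ size ∧ a ∣ size) := by
    intro a
    rw [hL, List.mem_filter, PySem.List.mem_pyRange_one]
    simp only [decide_eq_true_eq, PySem.Int.mod_eq_zero_iff_dvd]
    constructor
    · rintro ⟨⟨h1, h2⟩, h3⟩; exact ⟨h1, by omega, h3⟩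
    · rintro ⟨h1, h2, h3⟩; exact ⟨⟨h1, by omega⟩, h3⟩
  -- strictly increasing + same members ⇒ equal
  have hperm : L.Perm (Sm ++ Bg.reverse.map (fun e => PySem.Int.floordiv size e)) := by
    refine (List.perm_ext_iff_of_nodup ?_ ?_).2 (fun a => by rw [hmemL, hmemR])
    · exact hpairL.imp (fun h => ne_of_lt h)
    · exact hpairR.imp (fun h => ne_of_lt h)
  exact PySem.List.eq_of_perm_of_pairwise_le_of_injective (fun x => x)
    (fun a b h => h) hperm (hpairL.imp le_of_lt) (hpairR.imp le_of_lt)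

-- the inner-loop equality: A's per-size divisor list = B's per-size small ++ reverse big
theorem pvInner (size : Int) :
    iterate_divisors size = (pvDivLoop size (size.toNat + 1) 1 [] []).1 ++
      (pvDivLoop size (size.toNat + 1) 1 [] []).2.reverse := by
  unfold iterate_divisors
  rw [PySem.List.foldl_append_ite (p := fun i => PySem.Int.mod size i = 0)
      (f := fun i => (i, PySem.Int.floordiv size i)),
    pvDivLoop_spec size (size.toNat + 1) 1 [] [] le_rfl (by omega)]
  simp only [List.nil_append]
  rw [← List.map_reverse]
  have hg : ((pvCand size 1).filter
        (fun e => decide (PySem.Int.mod size e = 0) && decide (PySem.Int.floordiv size e ≠ e))).reverse.map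
        (fun e => (PySem.Int.floordiv size e, e)) =
      (((pvCand size 1).filter
        (fun e => decide (PySem.Int.mod size e = 0) && decide (PySem.Int.floordiv size e ≠ e))).reverse.map
        (fun e => PySem.Int.floordiv size e)).map (fun i => (i, PySem.Int.floordiv size i)) := by
    rw [List.map_map]
    refine List.map_congr_left (fun e he => ?_)
    rw [List.mem_reverse, List.mem_filter] at he
    obtain ⟨hc, hp⟩ := he
    obtain ⟨he1, he2⟩ := (mem_pvCand size 1 le_rfl e).1 hc
    simp only [Bool.and_eq_true, decide_eq_true_eq, PySem.Int.mod_eq_zero_iff_dvd] at hp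
    have hs : 1 ≤ size := by nlinarith
    simp only [Function.comp_apply, pvFloordivInv size e hs he1 hp.1]
  rw [hg, ← List.map_append, ← pvKeys size]

-- ===== VERDICT (by name: the statement is the Claim_ definition above) =====
theorem get_possible_shapes_spec : Claim_equal_get_possible_shapes := by
  intro mi sc _
  unfold Spec_get_possible_shapes get_possible_shapes get_possible_shapes_alt
  congr 1
  funext acc size
  rw [pvInner, List.append_assoc]
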